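-- pv_equiv track=rewrite | github.com/OscarGTH/GF-RPG-Chatbot | src/utils.py | int_to_digit
-- ===== SOURCE A (Python) =====
-- def int_to_digit(number) -> str:
--     """Turns integer into GF digit format."""
--     num_str = str(number)[::-1]
--     result = ""
--     for index, digit in enumerate(num_str):
--         if index == 0:
--             result = f"IDig D_{digit}"
--         else:
--             result = f"IIDig D_{digit} ({result})"
--     return f"({result})"
-- ===== SOURCE B (Python) =====
-- def int_to_digit(number) -> str:
--     """Turns integer into GF digit format."""
--
--     def rec(s):
--         # front-to-back recursion over the characters of str(number)
--         if len(s) == 1: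
--             return f"IDig D_{s}"
--         return f"IIDig D_{s[0]} ({rec(s[1:])})"
--
--     return f"({rec(str(number))})"
-- ===== Notes on version B (the rewrite author's own statement) =====
-- stated objective: alternative
-- what changed: Replaces the reverse-the-string loop with enumerate and index-0 test by a direct front-to-back recursion over the characters of str(number), with the one-character string as base case.
import Mathlib
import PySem

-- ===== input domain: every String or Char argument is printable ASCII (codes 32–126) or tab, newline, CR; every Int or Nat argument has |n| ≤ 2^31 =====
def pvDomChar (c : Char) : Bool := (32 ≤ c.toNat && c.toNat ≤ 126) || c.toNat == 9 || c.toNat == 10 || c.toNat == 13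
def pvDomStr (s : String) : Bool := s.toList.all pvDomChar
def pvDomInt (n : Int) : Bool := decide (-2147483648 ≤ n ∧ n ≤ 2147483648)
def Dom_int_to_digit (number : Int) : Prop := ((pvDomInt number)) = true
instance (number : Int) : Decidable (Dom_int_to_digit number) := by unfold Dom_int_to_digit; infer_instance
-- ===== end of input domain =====

-- B replaces A's reverse-then-enumerate loop by a front-to-back recursion over the
-- characters of str(number) (alternative decomposition, same cost).


-- ===== PORT A =====
def int_to_digit (number : Int) : String :=
  -- num_str = str(number)[::-1]  (slice with step -1 never fails: getD's default is unreachable)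
  let numStr : List Char :=
    (PySem.List.slice? (PySem.Int.toChars number) none none (-1)).getD []
  -- for index, digit in enumerate(num_str): …
  let result : String :=
    (PySem.List.enumerate numStr 0).foldl
      (fun result p =>
        if p.1 == 0 then "IDig D_" ++ p.2.toString
        else "IIDig D_" ++ p.2.toString ++ " (" ++ result ++ ")") ""
  "(" ++ result ++ ")"

-- ===== PORT B =====
-- rec(s): front-to-back recursion; [] case is a totality guard Source B never reaches
def digitRec : List Char → String
  | [] => ""
  | [c] => "IDig D_" ++ c.toString
  | c :: rest@(_ :: _) => "IIDig D_" ++ c.toString ++ " (" ++ digitRec rest ++ ")"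

def int_to_digit_alt (number : Int) : String :=
  "(" ++ digitRec (PySem.Int.toChars number) ++ ")"

-- ===== PRECONDITION & SPEC =====
def Spec_int_to_digit (number : Int) (out : String) : Prop := out = int_to_digit_alt number
instance (number : Int) (out : String) : Decidable (Spec_int_to_digit number out) := by unfold Spec_int_to_digit; infer_instance

-- ===== CLAIM (what is proved, stated in full; the proofs are below) =====
def Claim_equal_int_to_digit : Prop := ∀ (number : Int), Dom_int_to_digit number → Spec_int_to_digit number (int_to_digit number)

-- ===== LEMMAS AND PROOFS =====

-- A's loop over the reversed characters computes exactly B's front-to-back recursion.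
theorem foldl_enumerate_reverse_eq_digitRec (l : List Char) :
    (PySem.List.enumerate l.reverse 0).foldl
      (fun result p =>
        if p.1 == 0 then "IDig D_" ++ p.2.toString
        else "IIDig D_" ++ p.2.toString ++ " (" ++ result ++ ")") ""
    = digitRec l := by
  induction l with
  | nil => simp [digitRec]
  | cons c t ih =>
    have hrev : (c :: t).reverse = t.reverse ++ [c] := by simp
    rw [hrev, PySem.List.enumerate_append, List.foldl_append]
    cases t with
    | nil => simp [PySem.List.enumerate, digitRec]
    | cons d u =>
      have hne : ((0 : Int) + ((d :: u).reverse.length : Int)) ≠ 0 := by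
        simp; omega
      simp only [PySem.List.enumerate, List.foldl_cons, List.foldl_nil]
      rw [ih]
      simp only [digitRec]
      rw [if_neg (by simpa using hne)]

theorem int_to_digit_eq_alt (number : Int) :
    int_to_digit number = int_to_digit_alt number := by
  unfold int_to_digit int_to_digit_alt
  rw [PySem.List.slice?_none_none_neg_one]
  simp only [Option.getD_some]
  rw [foldl_enumerate_reverse_eq_digitRec]

-- ===== VERDICT (by name: the statement is the Claim_ definition above) =====
theorem int_to_digit_spec : Claim_equal_int_to_digit := by
  intro number _
  unfold Spec_int_to_digit
  exact int_to_digit_eq_alt number
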